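-- pv_equiv track=rewrite | github.com/oleggromov/contests | one-zero-position.py | char_at
-- ===== SOURCE A (Python) =====
-- def char_at(index):
--   zeroes = 0
--   ones = 0
--   # O(n) solution
--   while index + 1 > 0:
--     if zeroes < ones + 1:
--       zeroes += 1
--     else:
--       zeroes = 0
--       ones += 1
--     index -= 1
--
--   if zeroes == 0:
--     return '1'
--
--   return '0'
-- ===== SOURCE B (Python) =====
-- import math
--
-- def char_at(index):
--     # The sequence is 0 1 00 1 000 1 0000 1 ...; its '1's sit exactly at the
--     # positions where index + 1 == m*(m+3)//2 for some m >= 1, i.e. where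
--     # 8*(index+1) + 9 is an odd perfect square >= 25.  O(1) via integer sqrt.
--     n = index + 1
--     s = math.isqrt(8 * n + 9)
--     if s * s == 8 * n + 9 and s >= 5 and s % 2 == 1:
--         return '1'
--     return '0'
-- ===== Notes on version B (the rewrite author's own statement) =====
-- stated objective: faster
-- what changed: Replaces the O(n) state-machine loop over all positions by a closed form: the '1's of the block pattern sit exactly where 8*(index+1)+9 is an odd perfect square >= 25, tested with one integer sqrt.
-- outside the precondition, e.g. on char_at(-1): A returns '1', B returns '0'; on char_at(-3): A returns '1', B raises ValueError
import Mathlib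
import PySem

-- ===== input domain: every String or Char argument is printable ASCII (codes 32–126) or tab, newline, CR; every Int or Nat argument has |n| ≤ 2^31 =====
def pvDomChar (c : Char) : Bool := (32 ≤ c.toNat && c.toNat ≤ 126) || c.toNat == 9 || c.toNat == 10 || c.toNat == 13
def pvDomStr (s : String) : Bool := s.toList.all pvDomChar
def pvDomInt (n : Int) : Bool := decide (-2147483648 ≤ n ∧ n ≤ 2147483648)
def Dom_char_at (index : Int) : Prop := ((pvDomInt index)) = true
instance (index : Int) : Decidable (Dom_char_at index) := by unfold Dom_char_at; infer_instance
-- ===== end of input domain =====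

-- B replaces A's O(n) loop by an O(1) perfect-square test (integer sqrt); proved equal for index ≥ 0.

-- ===== PORT A =====
-- the while loop, fuel = number of iterations (index+1 when index ≥ 0, none otherwise)
def charAtLoop : Nat → Int → Int → Int × Int
  | 0, zeroes, ones => (zeroes, ones)
  | k + 1, zeroes, ones =>
      if zeroes < ones + 1 then charAtLoop k (zeroes + 1) ones
      else charAtLoop k 0 (ones + 1)

def char_at (index : Int) : String :=
  let st := charAtLoop (index + 1).toNat 0 0
  if st.1 = 0 then "1" else "0"

-- ===== PORT B =====
-- math.isqrt ported as Nat.sqrt (exact: inside Pre_ the argument 8*(index+1)+9 is nonnegative)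
def char_at_alt (index : Int) : String :=
  let n := index + 1
  let s : Int := (Nat.sqrt (8 * n + 9).toNat : Nat)
  if s * s = 8 * n + 9 ∧ 5 ≤ s ∧ s % 2 = 1 then "1" else "0"

-- ===== PRECONDITION & SPEC =====
-- Pre_ excludes negative indices, on which the block pattern has no position: A's '1' there is
-- the accident of the skipped while loop, and B's closed formula is undefined (isqrt of a negative).
def Pre_char_at (index : Int) : Prop := 0 ≤ index
instance (index : Int) : Decidable (Pre_char_at index) := by unfold Pre_char_at; infer_instance
def pvWitness_char_at : Int := 5

def Spec_char_at (index : Int) (out : String) : Prop := out = char_at_alt index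
instance (index : Int) (out : String) : Decidable (Spec_char_at index out) := by unfold Spec_char_at; infer_instance

-- ===== CLAIM (what is proved, stated in full; the proofs are below) =====
def Claim_equal_char_at : Prop := ∀ (index : Int), Dom_char_at index → Pre_char_at index → Spec_char_at index (char_at index)

-- ===== LEMMAS AND PROOFS =====

-- loop invariant: running the loop keeps 0 ≤ zeroes ≤ ones + 1 and the "total steps taken"
-- ones*(ones+3)/2 + zeroes; stated doubled to stay in integers.
theorem charAtLoop_inv (k : Nat) : ∀ (z o : Int), 0 ≤ z → 0 ≤ o → z ≤ o + 1 →
    ∃ z' o', charAtLoop k z o = (z', o') ∧ 0 ≤ z' ∧ 0 ≤ o' ∧ z' ≤ o' + 1 ∧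
      o' * (o' + 3) + 2 * z' = o * (o + 3) + 2 * z + 2 * k := by
  induction k with
  | zero =>
      intro z o hz ho hzo
      exact ⟨z, o, rfl, hz, ho, hzo, by ring⟩
  | succ k ih =>
      intro z o hz ho hzo
      rw [charAtLoop]
      split_ifs with h
      · obtain ⟨z', o', heq, h1, h2, h3, h4⟩ := ih (z + 1) o (by omega) ho (by omega)
        exact ⟨z', o', heq, h1, h2, h3, by push_cast at h4 ⊢; linarith⟩
      · have hz1 : z = o + 1 := by omega
        obtain ⟨z', o', heq, h1, h2, h3, h4⟩ := ih 0 (o + 1) (le_refl 0) (by omega) (by omega)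
        refine ⟨z', o', heq, h1, h2, h3, ?_⟩
        have e : (o + 1) * (o + 1 + 3) = o * (o + 3) + 2 * o + 4 := by ring
        push_cast at h4 ⊢
        rw [h4, e, hz1]; ring

theorem char_at_spec_aux (index : Int) (hpre : 0 ≤ index) :
    char_at index = char_at_alt index := by
  obtain ⟨z', o', heq, h1, h2, h3, h4⟩ :=
    charAtLoop_inv (index + 1).toNat 0 0 le_rfl le_rfl (by omega)
  have hk : ((index + 1).toNat : Int) = index + 1 := Int.toNat_of_nonneg (by omega)
  rw [hk] at h4
  -- h4 : o' * (o' + 3) + 2 * z' = 2 * (index + 1)  (after simplification)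
  have h4' : o' * (o' + 3) + 2 * z' = 2 * (index + 1) := by linarith
  unfold char_at char_at_alt
  rw [heq]
  by_cases hz : z' = 0
  · -- '1' case: 8*(index+1)+9 = (2*o'+3)^2, odd square ≥ 25
    have ho1 : 1 ≤ o' := by
      by_contra hc
      have : o' = 0 := by omega
      subst this; omega
    have hsq : 8 * (index + 1) + 9 = (2 * o' + 3) * (2 * o' + 3) := by nlinarith
    set a : Nat := (2 * o' + 3).toNat with ha
    have haI : ((a : Nat) : Int) = 2 * o' + 3 := Int.toNat_of_nonneg (by omega)
    have htn : (8 * (index + 1) + 9).toNat = a * a := by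
      have : (8 * (index + 1) + 9) = ((a * a : Nat) : Int) := by push_cast; rw [haI]; linarith [hsq]
      omega
    have hs : Nat.sqrt (8 * (index + 1) + 9).toNat = a := by
      rw [htn]; exact Nat.sqrt_eq a
    simp only [hz, hs]
    have hc : ((a : Int) * (a : Int) = 8 * (index + 1) + 9 ∧ 5 ≤ (a : Int) ∧ (a : Int) % 2 = 1) :=
      ⟨by rw [haI]; linarith [hsq], by omega, by omega⟩
    simp [hc]
  · -- '0' case: no odd square ≥ 25 equals 8*(index+1)+9
    rw [if_neg hz, if_neg]
    rintro ⟨hsq, hge, hodd⟩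
    set s : Int := ((Nat.sqrt (8 * (index + 1) + 9).toNat : Nat) : Int)
    obtain ⟨m, hm⟩ : ∃ m : Int, s = 2 * m + 3 := ⟨(s - 3) / 2, by omega⟩
    have hm1 : 1 ≤ m := by omega
    have h2n : m * (m + 3) = o' * (o' + 3) + 2 * z' := by nlinarith
    have hz1 : 1 ≤ z' := by omega
    by_cases hle : m ≤ o'
    · nlinarith [mul_nonneg (sub_nonneg.mpr hle) (by linarith : (0:Int) ≤ o' + m + 3)]
    · have : o' + 1 ≤ m := by omega
      nlinarith [mul_nonneg (by linarith : (0:Int) ≤ m - o' - 1) (by linarith : (0:Int) ≤ m + o' + 4)]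

-- ===== VERDICT (by name: the statement is the Claim_ definition above) =====
theorem char_at_spec : Claim_equal_char_at := by
  intro index _ hpre
  exact char_at_spec_aux index hpre
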